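-- pv_equiv track=rewrite | github.com/wickai/fibonacci_wave_2d | backend/cycles_lib.py | enumerate_cycles
-- ===== SOURCE A (Python) =====
-- from typing import List, Tuple, Dict, Set
--
-- def enumerate_cycles(base: int) -> List[List[Tuple[int, int]]]:
--     visited: Set[Tuple[int, int]] = set()
--     cycles: List[List[Tuple[int, int]]] = []
--
--     for a0 in range(base):
--         for b0 in range(base):
--             s = (a0, b0)
--             if s in visited:
--                 continue
--
--             path: List[Tuple[int, int]] = []
--             seen_index: Dict[Tuple[int, int], int] = {}
--             while s not in seen_index:
--                 seen_index[s] = len(path)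
--                 path.append(s)
--                 s = (s[1], (s[0] + s[1]) % base)
--
--             start = seen_index[s]
--             cycle_states = path[start:]
--
--             for node in path:
--                 visited.add(node)
--
--             if cycle_states:
--                 min_idx = min(range(len(cycle_states)), key=lambda i: cycle_states[i])
--                 canonical = cycle_states[min_idx:] + cycle_states[:min_idx]
--                 cycles.append(canonical)
--
--     unique = []
--     seen = set()
--     for cyc in cycles:
--         key = tuple(cyc)
--         if key not in seen:
--             seen.add(key)
--             unique.append(cyc)
--     return unique
-- ===== SOURCE B (Python) =====
-- from typing import List, Tuple
--
-- def enumerate_cycles(base: int) -> List[List[Tuple[int, int]]]: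
--     # The map (a,b) -> (b,(a+b)%base) is a bijection on [0,base)^2, so every
--     # state lies on a cycle: walk each orbit directly back to its start.
--     visited = set()
--     cycles: List[List[Tuple[int, int]]] = []
--     for a0 in range(base):
--         for b0 in range(base):
--             start = (a0, b0)
--             if start in visited:
--                 continue
--             cyc: List[Tuple[int, int]] = []
--             cur = start
--             while True:
--                 cyc.append(cur)
--                 cur = (cur[1], (cur[0] + cur[1]) % base)
--                 if cur == start:
--                     break
--             for node in cyc:
--                 visited.add(node)
--             i = cyc.index(min(cyc))
--             cycles.append(cyc[i:] + cyc[:i])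
--     return cycles
-- ===== Notes on version B (the rewrite author's own statement) =====
-- stated objective: simpler
-- what changed: B walks each orbit directly back to its starting state (the Fibonacci step is a bijection, so there are no tails), dropping A's seen_index dict, the path slicing, the index-minimum search (it takes the first index of min(cyc) instead) and the entire final dedup pass.
import Mathlib
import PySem

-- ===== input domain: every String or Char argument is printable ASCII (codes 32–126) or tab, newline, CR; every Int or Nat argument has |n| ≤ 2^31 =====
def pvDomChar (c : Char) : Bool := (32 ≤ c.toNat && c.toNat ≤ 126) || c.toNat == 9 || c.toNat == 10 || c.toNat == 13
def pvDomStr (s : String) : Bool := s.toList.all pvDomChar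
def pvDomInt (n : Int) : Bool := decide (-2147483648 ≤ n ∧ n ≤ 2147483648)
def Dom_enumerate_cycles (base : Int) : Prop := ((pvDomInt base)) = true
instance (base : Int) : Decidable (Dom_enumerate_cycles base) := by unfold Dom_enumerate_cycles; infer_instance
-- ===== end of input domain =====

-- B walks each orbit straight back to its start (the Fibonacci step is a bijection, so every state
-- lies on a cycle), omitting A's seen_index dict, path slicing, index-minimum search and final dedup
-- pass; objective: simpler, same asymptotic cost.

-- ===== PORT A =====
-- fuel: strictly more than the number of states in [0,base)^2; the while loops are proved to stop within it
def pvFuel (base : Int) : Nat := base.toNat * base.toNat + 1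

-- while s not in seen_index: seen_index[s] = len(path); path.append(s); s = (s[1], (s[0]+s[1]) % base)
def pvWhileA (base : Int) : Nat → (Int × Int) → List (Int × Int) → PySem.Dict (Int × Int) Int →
    List (Int × Int) × PySem.Dict (Int × Int) Int × (Int × Int)
  | 0, s, path, seen => (path, seen, s)       -- fuel exhausted: unreachable (lemma pvWhileA_run)
  | fuel+1, s, path, seen =>
    if seen.contains s then (path, seen, s)
    else pvWhileA base fuel (s.2, PySem.Int.mod (s.1 + s.2) base) (path ++ [s])
          (seen.insert s (PySem.List.len path))

-- body of A's nested for loops; state = (visited, cycles)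
def pvBodyA (base : Int) (st : PySem.Set (Int × Int) × List (List (Int × Int))) (s : Int × Int) :
    PySem.Set (Int × Int) × List (List (Int × Int)) :=
  if st.1.contains s then st
  else
    let r := pvWhileA base (pvFuel base) s [] PySem.Dict.empty
    let path := r.1
    -- start = seen_index[s]: the key is provably present (lemma pvWhileA_run), so getD is exact
    let start := PySem.Dict.getD r.2.1 r.2.2 0
    let cycle_states := PySem.List.slice path (some start) none
    let visited := path.foldl (fun v node => PySem.Set.add v node) st.1
    if cycle_states = [] then (visited, st.2)
    else
      -- min(range(len(cycle_states)), key=lambda i: cycle_states[i]): tuple-valued key ⇒ min2?;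
      -- the index i is always in range, so pyGetD with a dummy default is exact
      let min_idx := (PySem.List.min2? (PySem.List.pyRange 0 (PySem.List.len cycle_states) 1)
          (fun i => (PySem.List.pyGetD cycle_states i (0, 0)).1)
          (fun i => (PySem.List.pyGetD cycle_states i (0, 0)).2)).getD 0
      let canonical := PySem.List.slice cycle_states (some min_idx) none ++
          PySem.List.slice cycle_states none (some min_idx)
      (visited, st.2 ++ [canonical])

def enumerate_cycles (base : Int) : List (List (Int × Int)) :=
  let st := (PySem.List.pyRange 0 base 1).foldl (fun st a0 =>
    (PySem.List.pyRange 0 base 1).foldl (fun st b0 => pvBodyA base st (a0, b0)) st)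
    (PySem.Set.empty, [])
  -- final pass: unique = [...], seen = set(); tuple(cyc) keys compare like the lists themselves
  (st.2.foldl (fun (u : List (List (Int × Int)) × PySem.Set (List (Int × Int))) cyc =>
      if u.2.contains cyc then u else (u.1 ++ [cyc], PySem.Set.add u.2 cyc))
    ([], PySem.Set.empty)).1

-- ===== PORT B =====
-- while True: cyc.append(cur); cur = (cur[1], (cur[0]+cur[1]) % base); if cur == start: break
def pvWalkB (base : Int) (start : Int × Int) : Nat → (Int × Int) → List (Int × Int) → List (Int × Int)
  | 0, _, cyc => cyc                          -- fuel exhausted: unreachable (lemma pvWalkB_run)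
  | fuel+1, cur, cyc =>
    let cyc' := cyc ++ [cur]
    let nxt := (cur.2, PySem.Int.mod (cur.1 + cur.2) base)
    if nxt = start then cyc' else pvWalkB base start fuel nxt cyc'

def pvBodyB (base : Int) (st : PySem.Set (Int × Int) × List (List (Int × Int))) (start : Int × Int) :
    PySem.Set (Int × Int) × List (List (Int × Int)) :=
  if st.1.contains start then st
  else
    let cyc := pvWalkB base start (pvFuel base) start []
    let visited := cyc.foldl (fun v node => PySem.Set.add v node) st.1
    -- min(cyc) on tuples is the lexicographic minimum ⇒ min2?; cyc is provably nonempty,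
    -- so both .getD defaults are never used
    let m := (PySem.List.min2? cyc (fun x => x.1) (fun x => x.2)).getD (0, 0)
    let i := (PySem.List.index? cyc m).getD 0
    (visited, st.2 ++ [cyc.drop i ++ cyc.take i])

def enumerate_cycles_alt (base : Int) : List (List (Int × Int)) :=
  ((PySem.List.pyRange 0 base 1).foldl (fun st a0 =>
    (PySem.List.pyRange 0 base 1).foldl (fun st b0 => pvBodyB base st (a0, b0)) st)
    ((PySem.Set.empty : PySem.Set (Int × Int)), [])).2

-- ===== PRECONDITION & SPEC =====
def Spec_enumerate_cycles (base : Int) (out : List (List (Int × Int))) : Prop := out = enumerate_cycles_alt base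
instance (base : Int) (out : List (List (Int × Int))) : Decidable (Spec_enumerate_cycles base out) := by unfold Spec_enumerate_cycles; infer_instance

-- ===== CLAIM (what is proved, stated in full; the proofs are below) =====
def Claim_equal_enumerate_cycles : Prop := ∀ (base : Int), Dom_enumerate_cycles base → Spec_enumerate_cycles base (enumerate_cycles base)

-- ===== LEMMAS AND PROOFS =====

-- the Fibonacci step map and the state space [0,base)^2
def pvF (base : Int) (s : Int × Int) : Int × Int := (s.2, PySem.Int.mod (s.1 + s.2) base)
def pvInS (base : Int) (s : Int × Int) : Prop := 0 ≤ s.1 ∧ s.1 < base ∧ 0 ≤ s.2 ∧ s.2 < base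
def pvL (base : Int) (s0 : Int × Int) (j : Nat) : List (Int × Int) :=
  (List.range j).map (fun k => (pvF base)^[k] s0)
-- Python's lexicographic order on int pairs
def pvLexLt (x y : Int × Int) : Prop := x.1 < y.1 ∨ (x.1 = y.1 ∧ x.2 < y.2)

theorem pvF_mem {base : Int} (hb : 0 < base) {s : Int × Int} (hs : pvInS base s) :
    pvInS base (pvF base s) := by
  obtain ⟨h1, h2, h3, h4⟩ := hs
  exact ⟨h3, h4, PySem.Int.mod_nonneg _ hb, PySem.Int.mod_lt _ hb⟩

theorem pvF_inj {base : Int} (hb : 0 < base) {s t : Int × Int}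
    (hs : pvInS base s) (ht : pvInS base t) (h : pvF base s = pvF base t) : s = t := by
  obtain ⟨s1, s2⟩ := s
  obtain ⟨t1, t2⟩ := t
  obtain ⟨hs1, hs2, hs3, hs4⟩ := hs
  obtain ⟨ht1, ht2, ht3, ht4⟩ := ht
  simp only [pvF, Prod.mk.injEq] at h ⊢
  obtain ⟨h2, hm⟩ := h
  subst h2
  simp only [PySem.Int.mod_eq_emod_of_pos hb] at hm
  refine ⟨?_, rfl⟩
  obtain ⟨c, hc⟩ := Int.ModEq.dvd hm
  have h1 : t1 - s1 = base * c := by linarith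
  rcases lt_trichotomy c 0 with h | h | h
  · nlinarith
  · rw [h, mul_zero] at h1; omega
  · nlinarith

theorem pvIter_mem {base : Int} (hb : 0 < base) {s0 : Int × Int} (hs : pvInS base s0) :
    ∀ k, pvInS base ((pvF base)^[k] s0) := by
  intro k
  induction k with
  | zero => simpa using hs
  | succ n ih => rw [Function.iterate_succ_apply']; exact pvF_mem hb ih

theorem pvIter_cancel {base : Int} (hb : 0 < base) {x y : Int × Int}
    (hx : pvInS base x) (hy : pvInS base y) :
    ∀ i, (pvF base)^[i] x = (pvF base)^[i] y → x = y := by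
  intro i
  induction i with
  | zero => simp
  | succ n ih =>
    intro h
    rw [Function.iterate_succ_apply', Function.iterate_succ_apply'] at h
    exact ih (pvF_inj hb (pvIter_mem hb hx n) (pvIter_mem hb hy n) h)

theorem pvExists_period {base : Int} (hb : 0 < base) {s0 : Int × Int} (hs : pvInS base s0) :
    ∃ p, 0 < p ∧ p ≤ base.toNat * base.toNat ∧ (pvF base)^[p] s0 = s0 ∧
      (∀ k, 0 < k → k < p → (pvF base)^[k] s0 ≠ s0) := by
  classical
  have hcard : (Finset.Ico (0:Int) base ×ˢ Finset.Ico (0:Int) base).card <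
      (Finset.range (base.toNat * base.toNat + 1)).card := by
    rw [Finset.card_product, Finset.card_range, Int.card_Ico]
    simp only [Int.sub_zero]
    omega
  have hmaps : ∀ k ∈ Finset.range (base.toNat * base.toNat + 1),
      (pvF base)^[k] s0 ∈ Finset.Ico (0:Int) base ×ˢ Finset.Ico (0:Int) base := by
    intro k _
    obtain ⟨h1, h2, h3, h4⟩ := pvIter_mem hb hs k
    simp only [Finset.mem_product, Finset.mem_Ico]
    exact ⟨⟨h1, h2⟩, h3, h4⟩
  obtain ⟨i, hi, j, hj, hne, heq⟩ := Finset.exists_ne_map_eq_of_card_lt_of_maps_to hcard hmaps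
  simp only [Finset.mem_range] at hi hj
  -- wlog i < j
  have key : ∀ i j : Nat, i < j → j < base.toNat * base.toNat + 1 →
      (pvF base)^[i] s0 = (pvF base)^[j] s0 →
      ∃ d, (0 < d ∧ (pvF base)^[d] s0 = s0) ∧ d ≤ base.toNat * base.toNat := by
    intro i j hij hjN h
    refine ⟨j - i, ⟨by omega, ?_⟩, by omega⟩
    have h' : (pvF base)^[i] ((pvF base)^[j-i] s0) = (pvF base)^[i] s0 := by
      rw [← Function.iterate_add_apply]
      rw [h]
      congr 1
      omega
    exact pvIter_cancel hb (pvIter_mem hb hs _) hs i h'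
  have hex : ∃ d, (0 < d ∧ (pvF base)^[d] s0 = s0) ∧ d ≤ base.toNat * base.toNat := by
    rcases Nat.lt_or_ge i j with h | h
    · exact key i j h hj heq
    · exact key j i (by omega) hi heq.symm
  obtain ⟨d, hd, hdN⟩ := hex
  have hex' : ∃ d, 0 < d ∧ (pvF base)^[d] s0 = s0 := ⟨d, hd⟩
  refine ⟨Nat.find hex', (Nat.find_spec hex').1, ?_, (Nat.find_spec hex').2, ?_⟩
  · exact le_trans (Nat.find_le hd) hdN
  · intro k hk hklt hfix
    exact absurd ⟨hk, hfix⟩ (Nat.find_min hex' hklt)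

-- distinctness of iterates below the period
theorem pvIter_ne {base : Int} (hb : 0 < base) {s0 : Int × Int} (hs : pvInS base s0) {p : Nat}
    (hfix : (pvF base)^[p] s0 = s0) (hmin : ∀ k, 0 < k → k < p → (pvF base)^[k] s0 ≠ s0)
    {i j : Nat} (hij : i < j) (hjp : j ≤ p) (h : (pvF base)^[i] s0 = (pvF base)^[j] s0) :
    i = 0 ∧ j = p := by
  have h' : (pvF base)^[i] ((pvF base)^[j-i] s0) = (pvF base)^[i] s0 := by
    rw [← Function.iterate_add_apply, show i + (j - i) = j by omega]
    exact h.symm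
  have hds : (pvF base)^[j-i] s0 = s0 := pvIter_cancel hb (pvIter_mem hb hs _) hs i h'
  have hge : ¬ (j - i < p) := fun hlt => hmin (j - i) (by omega) hlt hds
  omega

theorem pvL_succ (base : Int) (s0 : Int × Int) (j : Nat) :
    pvL base s0 (j + 1) = pvL base s0 j ++ [(pvF base)^[j] s0] := by
  simp [pvL, List.range_succ]

theorem pvMem_L {base : Int} {s0 : Int × Int} {x : Int × Int} {j : Nat} :
    x ∈ pvL base s0 j ↔ ∃ k, k < j ∧ x = (pvF base)^[k] s0 := by
  simp [pvL]

theorem pvNodup_L {base : Int} (hb : 0 < base) {s0 : Int × Int} (hs : pvInS base s0) {p : Nat}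
    (hp0 : 0 < p) (hfix : (pvF base)^[p] s0 = s0)
    (hmin : ∀ k, 0 < k → k < p → (pvF base)^[k] s0 ≠ s0) : (pvL base s0 p).Nodup := by
  refine List.Nodup.map_on ?_ (List.nodup_range)
  intro i hi j hj h
  simp only [List.mem_range] at hi hj
  rcases Nat.lt_trichotomy i j with hij | hij | hij
  · exact absurd (pvIter_ne hb hs hfix hmin hij (by omega) h).2 (by omega)
  · exact hij
  · exact absurd (pvIter_ne hb hs hfix hmin hij (by omega) h.symm).2 (by omega)

theorem pvMem_L_iff {base : Int} (hb : 0 < base) {s0 : Int × Int} (hs : pvInS base s0) {p : Nat}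
    (hp0 : 0 < p) (hfix : (pvF base)^[p] s0 = s0)
    (hmin : ∀ k, 0 < k → k < p → (pvF base)^[k] s0 ≠ s0) {j : Nat} (hj : j ≤ p) :
    ((pvF base)^[j] s0 ∈ pvL base s0 j) ↔ j = p := by
  constructor
  · intro hmem
    obtain ⟨k, hk, hkeq⟩ := pvMem_L.mp hmem
    exact (pvIter_ne hb hs hfix hmin hk hj hkeq.symm).2
  · intro hjp
    subst hjp
    exact pvMem_L.mpr ⟨0, hp0, by simp [hfix]⟩

-- ===== the two loops compute the orbit =====

theorem pvWhileA_go {base : Int} (hb : 0 < base) {s0 : Int × Int} (hs : pvInS base s0) {p : Nat}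
    (hp0 : 0 < p) (hfix : (pvF base)^[p] s0 = s0)
    (hmin : ∀ k, 0 < k → k < p → (pvF base)^[k] s0 ≠ s0) :
    ∀ (fuel j : Nat) (d : PySem.Dict (Int × Int) Int), j ≤ p → p + 1 ≤ fuel + j →
      (∀ x, d.contains x = decide (x ∈ pvL base s0 j)) →
      (1 ≤ j → d.get? s0 = some 0) →
      ∃ d', pvWhileA base fuel ((pvF base)^[j] s0) (pvL base s0 j) d = (pvL base s0 p, d', s0) ∧
        d'.get? s0 = some 0 := by
  intro fuel
  induction fuel with
  | zero => intro j d hj hfuel _ _; omega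
  | succ fuel ih =>
    intro j d hj hfuel hd hd0
    simp only [pvWhileA]
    rw [hd]
    by_cases hmem : (pvF base)^[j] s0 ∈ pvL base s0 j
    · have hjp : j = p := (pvMem_L_iff hb hs hp0 hfix hmin hj).mp hmem
      subst hjp
      refine ⟨d, ?_, hd0 hp0⟩
      rw [if_pos (decide_eq_true hmem), hfix]
    · have hjp : j < p := by
        rcases Nat.lt_or_ge j p with h | h
        · exact h
        · exfalso
          have hEq : j = p := by omega
          subst hEq
          exact hmem ((pvMem_L_iff hb hs hp0 hfix hmin hj).mpr rfl)
      simp only [hmem, decide_false, Bool.false_eq_true, if_false]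
      have hstep : ((((pvF base)^[j] s0).2 : Int), PySem.Int.mod (((pvF base)^[j] s0).1 + ((pvF base)^[j] s0).2) base) = (pvF base)^[j+1] s0 := by
        rw [Function.iterate_succ_apply']; rfl
      rw [hstep, ← pvL_succ]
      have hd' : ∀ x, (d.insert ((pvF base)^[j] s0) (PySem.List.len (pvL base s0 j))).contains x
          = decide (x ∈ pvL base s0 (j+1)) := by
        intro x
        rw [PySem.Dict.contains_insert, hd x, pvL_succ]
        by_cases hx : x = (pvF base)^[j] s0
        · simp [hx]
        · simp [hx, List.mem_append]
      have hd0' : 1 ≤ j + 1 →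
          (d.insert ((pvF base)^[j] s0) (PySem.List.len (pvL base s0 j))).get? s0 = some 0 := by
        intro _
        rcases Nat.eq_zero_or_pos j with hj0 | hj1
        · subst hj0
          have h0 : (pvF base)^[0] s0 = s0 := rfl
          rw [h0, PySem.Dict.get?_insert_self]
          simp [pvL]
        · have hs0mem : s0 ∈ pvL base s0 j := pvMem_L.mpr ⟨0, hj1, rfl⟩
          have hne : s0 ≠ (pvF base)^[j] s0 := fun h => hmem (h ▸ hs0mem)
          rw [PySem.Dict.get?_insert_of_ne _ _ hne]
          exact hd0 hj1
      exact ih (j+1) _ (by omega) (by omega) hd' hd0'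

theorem pvWalkB_go {base : Int} (hb : 0 < base) {s0 : Int × Int} (hs : pvInS base s0) {p : Nat}
    (hp0 : 0 < p) (hfix : (pvF base)^[p] s0 = s0)
    (hmin : ∀ k, 0 < k → k < p → (pvF base)^[k] s0 ≠ s0) :
    ∀ (fuel j : Nat), j < p → p ≤ fuel + j →
      pvWalkB base s0 fuel ((pvF base)^[j] s0) (pvL base s0 j) = pvL base s0 p := by
  intro fuel
  induction fuel with
  | zero => intro j hj hfuel; omega
  | succ fuel ih =>
    intro j hj hfuel
    simp only [pvWalkB]
    have hstep : ((((pvF base)^[j] s0).2 : Int), PySem.Int.mod (((pvF base)^[j] s0).1 + ((pvF base)^[j] s0).2) base) = (pvF base)^[j+1] s0 := by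
      rw [Function.iterate_succ_apply']; rfl
    rw [hstep, ← pvL_succ]
    by_cases hend : j + 1 = p
    · rw [if_pos (by rw [hend]; exact hfix), hend]
    · rw [if_neg (hmin (j+1) (by omega) (by omega))]
      exact ih (j+1) (by omega) (by omega)

-- ===== min2? specification (first lexicographic minimum) =====

def pvLexLtb (a b : Int × Int) : Bool :=
  decide (a.1 < b.1) || (!decide (b.1 < a.1) && decide (a.2 < b.2))

def pvMinFold {α : Type} (k1 k2 : α → Int) : α → List α → α
  | m, [] => m
  | m, x :: xs => pvMinFold k1 k2 (if pvLexLtb (k1 x, k2 x) (k1 m, k2 m) then x else m) xs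

theorem pvLexLtb_iff (a b : Int × Int) : pvLexLtb a b = true ↔ pvLexLt a b := by
  obtain ⟨a1, a2⟩ := a
  obtain ⟨b1, b2⟩ := b
  simp [pvLexLtb, pvLexLt]
  omega

theorem pvLex_lt_of_lt_of_nlt {a b c : Int × Int} (h1 : pvLexLt a b) (h2 : ¬ pvLexLt c b) :
    pvLexLt a c := by
  obtain ⟨a1, a2⟩ := a
  obtain ⟨b1, b2⟩ := b
  obtain ⟨c1, c2⟩ := c
  simp only [pvLexLt] at *
  omega

theorem pvLex_antisymm {a b : Int × Int} (h1 : ¬ pvLexLt a b) (h2 : ¬ pvLexLt b a) : a = b := by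
  obtain ⟨a1, a2⟩ := a
  obtain ⟨b1, b2⟩ := b
  simp only [pvLexLt, Prod.mk.injEq] at *
  omega

theorem pvMin2_eq_minFold {α : Type} (k1 k2 : α → Int) :
    ∀ (xs : List α) (m0 : α), PySem.List.min2? (m0 :: xs) k1 k2 = some (pvMinFold k1 k2 m0 xs) := by
  intro xs
  induction xs with
  | nil => intro m0; rfl
  | cons x xs ih =>
    intro m0
    have h1 : PySem.List.min2? (m0 :: x :: xs) k1 k2 =
        PySem.List.min2? ((if pvLexLtb (k1 x, k2 x) (k1 m0, k2 m0) then x else m0) :: xs) k1 k2 := by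
      simp only [PySem.List.min2?, List.foldl_cons]
      congr 1
      simp only [pvLexLtb, apply_ite]
      split
      · rfl
      · rfl
    rw [h1, ih, pvMinFold]

theorem pvLex_irrefl (a : Int × Int) : ¬ pvLexLt a a := by
  obtain ⟨a1, a2⟩ := a
  simp only [pvLexLt]
  omega

theorem pvLex_trans {a b c : Int × Int} (h1 : pvLexLt a b) (h2 : pvLexLt b c) : pvLexLt a c := by
  obtain ⟨a1, a2⟩ := a
  obtain ⟨b1, b2⟩ := b
  obtain ⟨c1, c2⟩ := c
  simp only [pvLexLt] at *
  omega

theorem pvMinFold_spec {α : Type} (k1 k2 : α → Int) :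
    ∀ (xs : List α) (m0 : α),
      (pvMinFold k1 k2 m0 xs = m0 ∨ pvMinFold k1 k2 m0 xs ∈ xs) ∧
      ¬ pvLexLt (k1 m0, k2 m0) (k1 (pvMinFold k1 k2 m0 xs), k2 (pvMinFold k1 k2 m0 xs)) ∧
      ∀ y ∈ xs, ¬ pvLexLt (k1 y, k2 y) (k1 (pvMinFold k1 k2 m0 xs), k2 (pvMinFold k1 k2 m0 xs)) := by
  intro xs
  induction xs with
  | nil =>
    intro m0
    exact ⟨Or.inl rfl, pvLex_irrefl _, by simp⟩
  | cons x xs ih =>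
    intro m0
    simp only [pvMinFold]
    by_cases hc : pvLexLtb (k1 x, k2 x) (k1 m0, k2 m0) = true
    · rw [if_pos hc]
      obtain ⟨hmem, hmin1, hall⟩ := ih x
      have hxm0 : pvLexLt (k1 x, k2 x) (k1 m0, k2 m0) := (pvLexLtb_iff _ _).mp hc
      refine ⟨?_, ?_, ?_⟩
      · rcases hmem with h | h
        · rw [h]
          exact Or.inr List.mem_cons_self
        · exact Or.inr (List.mem_cons_of_mem _ h)
      · intro hlt
        exact hmin1 (pvLex_trans hxm0 hlt)
      · intro y hy
        rcases List.mem_cons.mp hy with h | h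
        · rw [h]; exact hmin1
        · exact hall y h
    · rw [if_neg hc]
      obtain ⟨hmem, hmin1, hall⟩ := ih m0
      have hxm0 : ¬ pvLexLt (k1 x, k2 x) (k1 m0, k2 m0) := fun h => hc ((pvLexLtb_iff _ _).mpr h)
      refine ⟨?_, hmin1, ?_⟩
      · rcases hmem with h | h
        · exact Or.inl h
        · exact Or.inr (List.mem_cons_of_mem _ h)
      · intro y hy
        rcases List.mem_cons.mp hy with h | h
        · intro hlt
          exact hxm0 (h ▸ pvLex_lt_of_lt_of_nlt hlt hmin1)
        · exact hall y h

theorem pvMin2_spec {α : Type} (k1 k2 : α → Int) :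
    ∀ (xs : List α) (m : α), PySem.List.min2? xs k1 k2 = some m →
      m ∈ xs ∧ ∀ y ∈ xs, ¬ pvLexLt (k1 y, k2 y) (k1 m, k2 m) := by
  intro xs m h
  match xs with
  | [] => simp [PySem.List.min2?] at h
  | m0 :: xs =>
    rw [pvMin2_eq_minFold] at h
    obtain ⟨hmem, hm0, hall⟩ := pvMinFold_spec k1 k2 xs m0
    have hm : m = pvMinFold k1 k2 m0 xs := by injection h.symm
    subst hm
    constructor
    · rcases hmem with h | h
      · rw [h]; exact List.mem_cons_self
      · exact List.mem_cons_of_mem _ h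
    · intro y hy
      rcases List.mem_cons.mp hy with h | h
      · rw [h]; exact hm0
      · exact hall y h

theorem pvMin2_isSome {α : Type} (k1 k2 : α → Int) (xs : List α) (hne : xs ≠ []) :
    ∃ m, PySem.List.min2? xs k1 k2 = some m := by
  match xs with
  | [] => exact absurd rfl hne
  | m0 :: xs => exact ⟨_, pvMin2_eq_minFold k1 k2 xs m0⟩

-- A's index-minimum equals B's index of the minimum element on a nodup list
theorem pvArgmin_eq (cs : List (Int × Int)) (hne : cs ≠ []) (hnd : cs.Nodup) :
    ∃ i : Nat, i < cs.length ∧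
      (PySem.List.min2? (PySem.List.pyRange 0 (PySem.List.len cs) 1)
          (fun i => (PySem.List.pyGetD cs i (0, 0)).1)
          (fun i => (PySem.List.pyGetD cs i (0, 0)).2)).getD 0 = (i : Int) ∧
      (PySem.List.index? cs ((PySem.List.min2? cs (fun x => x.1) (fun x => x.2)).getD (0, 0))).getD 0 = i := by
  have hlen : 0 < cs.length := List.length_pos_of_ne_nil hne
  have hrne : PySem.List.pyRange 0 (PySem.List.len cs) 1 ≠ [] := by
    have hl : (PySem.List.pyRange 0 (PySem.List.len cs) 1).length = cs.length := by
      rw [PySem.List.len_eq, PySem.List.length_pyRange_one]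
      omega
    intro h
    rw [h] at hl
    simp at hl
    omega
  obtain ⟨mA, hmA⟩ := pvMin2_isSome (fun i : Int => (PySem.List.pyGetD cs i (0, 0)).1)
    (fun i : Int => (PySem.List.pyGetD cs i (0, 0)).2) _ hrne
  obtain ⟨hmAmem, hmAmin⟩ := pvMin2_spec _ _ _ _ hmA
  obtain ⟨mB, hmB⟩ := pvMin2_isSome (fun x : Int × Int => x.1) (fun x => x.2) cs hne
  obtain ⟨hmBmem, hmBmin⟩ := pvMin2_spec _ _ _ _ hmB
  have hmA_bounds : 0 ≤ mA ∧ mA < (cs.length : Int) := by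
    have h := PySem.List.mem_pyRange_one.mp hmAmem
    rw [PySem.List.len_eq] at h
    omega
  have haa : (mA.toNat : Int) = mA := Int.toNat_of_nonneg hmA_bounds.1
  have halen : mA.toNat < cs.length := by omega
  have hget : PySem.List.pyGetD cs mA (0, 0) = cs[mA.toNat] :=
    PySem.List.pyGetD_eq_getElem cs (0, 0) hmA_bounds.1 hmA_bounds.2
  have hminA : ∀ y ∈ cs, ¬ pvLexLt y cs[mA.toNat] := by
    intro y hy hlt
    obtain ⟨j, hj, hjy⟩ := List.getElem_of_mem hy
    have hjmem : (j : Int) ∈ PySem.List.pyRange 0 (PySem.List.len cs) 1 :=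
      PySem.List.mem_pyRange_one.mpr ⟨by omega, by rw [PySem.List.len_eq]; exact_mod_cast hj⟩
    have hmin := hmAmin (j : Int) hjmem
    have hgj : PySem.List.pyGetD cs (j : Int) (0, 0) = cs[j] :=
      PySem.List.pyGetD_eq_getElem cs (0, 0) (by omega) (by exact_mod_cast hj)
    apply hmin
    simp only [hgj, hget, hjy, Prod.mk.eta]
    exact hlt
  have hBA : mB = cs[mA.toNat] := by
    apply pvLex_antisymm
    · exact hminA mB hmBmem
    · have h := hmBmin cs[mA.toNat] (List.getElem_mem halen)
      simpa using h
  have hsome : (PySem.List.index? cs mB).isSome := (PySem.List.index?_isSome_iff cs mB).mpr hmBmem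
  obtain ⟨iB, hiB⟩ := Option.isSome_iff_exists.mp hsome
  obtain ⟨hk, heq, _⟩ := PySem.List.getElem_of_index?_eq_some hiB
  have hia : iB = mA.toNat := hnd.getElem_inj_iff.mp (by rw [heq, hBA])
  refine ⟨mA.toNat, halen, ?_, ?_⟩
  · rw [hmA]
    simp only [Option.getD_some]
    omega
  · rw [hmB]
    simp only [Option.getD_some]
    rw [hiB]
    simp only [Option.getD_some]
    exact hia

-- ===== the loop bodies agree =====

theorem pvBody_eq {base : Int} (hb : 0 < base) {s0 : Int × Int} (hs : pvInS base s0)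
    (st : PySem.Set (Int × Int) × List (List (Int × Int))) :
    pvBodyA base st s0 = pvBodyB base st s0 := by
  by_cases hv : st.1.contains s0 = true
  · have hm : s0 ∈ st.1 := (PySem.Set.contains_iff st.1 s0).mp hv
    simp [pvBodyA, pvBodyB, hm]
  · obtain ⟨p, hp0, hpN, hfix, hmin⟩ := pvExists_period hb hs
    obtain ⟨d', hrun, hget⟩ := pvWhileA_go hb hs hp0 hfix hmin (pvFuel base) 0 PySem.Dict.empty
      (by omega) (by simp only [pvFuel]; omega) (fun x => by simp [pvL]) (by omega)
    rw [show ((pvF base)^[0] s0) = s0 from rfl, show pvL base s0 0 = [] by simp [pvL]] at hrun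
    have hwalk := pvWalkB_go hb hs hp0 hfix hmin (pvFuel base) 0 hp0 (by simp only [pvFuel]; omega)
    rw [show ((pvF base)^[0] s0) = s0 from rfl, show pvL base s0 0 = [] by simp [pvL]] at hwalk
    have hLne : pvL base s0 p ≠ [] := by
      simp only [pvL, ne_eq, List.map_eq_nil_iff, List.range_eq_nil]
      omega
    obtain ⟨i, hilen, hA, hB⟩ := pvArgmin_eq (pvL base s0 p) hLne (pvNodup_L hb hs hp0 hfix hmin)
    simp only [pvBodyA, pvBodyB, hv, Bool.false_eq_true, if_false, hrun, hwalk]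
    rw [PySem.Dict.getD_eq_get?_getD, hget]
    simp only [Option.getD_some]
    rw [PySem.List.slice_zero_start, PySem.List.slice_none_none, if_neg hLne, hA, hB]
    rw [PySem.List.slice_from_natCast, PySem.List.slice_to_natCast]

-- invariant carried through B's fold: every recorded cycle is inside visited, and cycles are pairwise distinct
def pvInv (st : PySem.Set (Int × Int) × List (List (Int × Int))) : Prop :=
  (∀ c ∈ st.2, ∀ x ∈ c, x ∈ st.1) ∧ st.2.Pairwise (· ≠ ·)

theorem pvBodyB_inv {base : Int} (hb : 0 < base) {s0 : Int × Int} (hs : pvInS base s0)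
    {st : PySem.Set (Int × Int) × List (List (Int × Int))} (hinv : pvInv st) :
    pvInv (pvBodyB base st s0) := by
  by_cases hv : st.1.contains s0 = true
  · have hm : s0 ∈ st.1 := (PySem.Set.contains_iff st.1 s0).mp hv
    simpa [pvBodyB, hv, hm] using hinv
  · obtain ⟨p, hp0, hpN, hfix, hmin⟩ := pvExists_period hb hs
    have hwalk := pvWalkB_go hb hs hp0 hfix hmin (pvFuel base) 0 hp0 (by simp only [pvFuel]; omega)
    rw [show ((pvF base)^[0] s0) = s0 from rfl, show pvL base s0 0 = [] by simp [pvL]] at hwalk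
    obtain ⟨hsub, hpw⟩ := hinv
    have hs0L : s0 ∈ pvL base s0 p := pvMem_L.mpr ⟨0, hp0, rfl⟩
    have hs0V : s0 ∉ st.1 := fun h => hv ((PySem.Set.contains_iff st.1 s0).mpr h)
    have hvm : ∀ y, y ∈ (pvL base s0 p).foldl (fun v node => PySem.Set.add v node) st.1 ↔
        y ∈ st.1 ∨ y ∈ pvL base s0 p := by
      intro y
      rw [PySem.Set.mem_foldl_add (pvL base s0 p) (fun b => b) st.1 y]
      simp
    have hrot : ∀ (n : Nat) (y : Int × Int), y ∈ pvL base s0 p →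
        y ∈ (pvL base s0 p).drop n ++ (pvL base s0 p).take n := by
      intro n y hy
      rw [List.mem_append, or_comm, ← List.mem_append, List.take_append_drop]
      exact hy
    simp only [pvBodyB, hv, Bool.false_eq_true, if_false, hwalk, pvInv]
    constructor
    · intro c hc x hx
      rw [hvm]
      rcases List.mem_append.mp hc with hcold | hcnew
      · exact Or.inl (hsub c hcold x hx)
      · simp only [List.mem_singleton] at hcnew
        subst hcnew
        rcases List.mem_append.mp hx with h | h
        · exact Or.inr (List.mem_of_mem_drop h)
        · exact Or.inr (List.mem_of_mem_take h)
    · rw [List.pairwise_append]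
      refine ⟨hpw, by simp, ?_⟩
      intro c hc o ho
      simp only [List.mem_singleton] at ho
      subst ho
      intro heq
      have hs0c : s0 ∈ c := by
        rw [heq]
        exact hrot _ s0 hs0L
      exact hs0V (hsub c hc s0 hs0c)

theorem pvDedup_id {α : Type} [BEq α] [LawfulBEq α] :
    ∀ (C : List α) (acc : List α) (seen : PySem.Set α), C.Pairwise (· ≠ ·) →
      (∀ c ∈ C, c ∉ seen) →
      (C.foldl (fun (u : List α × PySem.Set α) cyc =>
        if u.2.contains cyc then u else (u.1 ++ [cyc], PySem.Set.add u.2 cyc)) (acc, seen)).1 = acc ++ C := by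
  intro C
  induction C with
  | nil => intro acc seen _ _; simp
  | cons c C ih =>
    intro acc seen hpw hnot
    have hc : seen.contains c = false := by
      rw [Bool.eq_false_iff]
      intro h
      exact hnot c List.mem_cons_self ((PySem.Set.contains_iff seen c).mp h)
    have hnot' : ∀ c' ∈ C, c' ∉ PySem.Set.add seen c := by
      intro c' hc' hmem
      rcases (PySem.Set.mem_add seen c c').mp hmem with h | h
      · exact hnot c' (List.mem_cons_of_mem _ hc') h
      · exact (List.pairwise_cons.mp hpw).1 c' hc' h.symm
    rw [List.foldl_cons, hc]
    simp only [Bool.false_eq_true, if_false]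
    rw [ih (acc ++ [c]) (PySem.Set.add seen c) (List.Pairwise.of_cons hpw) hnot']
    simp

-- ===== VERDICT (by name: the statement is the Claim_ definition above) =====
theorem enumerate_cycles_spec : Claim_equal_enumerate_cycles := by
  intro base _hdom
  unfold Spec_enumerate_cycles enumerate_cycles enumerate_cycles_alt
  have hcong :
      (PySem.List.pyRange 0 base 1).foldl (fun st a0 =>
        (PySem.List.pyRange 0 base 1).foldl (fun st b0 => pvBodyA base st (a0, b0)) st)
        (PySem.Set.empty, [])
      = (PySem.List.pyRange 0 base 1).foldl (fun st a0 =>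
        (PySem.List.pyRange 0 base 1).foldl (fun st b0 => pvBodyB base st (a0, b0)) st)
        (PySem.Set.empty, []) := by
    apply PySem.List.foldl_congr_mem'
    intro a0 ha0 acc
    apply PySem.List.foldl_congr_mem'
    intro b0 hb0 acc2
    obtain ⟨ha1, ha2⟩ := PySem.List.mem_pyRange_one.mp ha0
    obtain ⟨hb1, hb2⟩ := PySem.List.mem_pyRange_one.mp hb0
    exact pvBody_eq (by omega) ⟨ha1, ha2, hb1, hb2⟩ acc2
  simp only [hcong]
  have hinv : pvInv ((PySem.List.pyRange 0 base 1).foldl (fun st a0 =>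
      (PySem.List.pyRange 0 base 1).foldl (fun st b0 => pvBodyB base st (a0, b0)) st)
      (PySem.Set.empty, [])) := by
    refine List.foldlRecOn _ _ ⟨by simp, List.Pairwise.nil⟩ ?_
    intro st hst a0 ha0
    refine List.foldlRecOn _ _ hst ?_
    intro st' hst' b0 hb0
    obtain ⟨ha1, ha2⟩ := PySem.List.mem_pyRange_one.mp ha0
    obtain ⟨hb1, hb2⟩ := PySem.List.mem_pyRange_one.mp hb0
    exact pvBodyB_inv (by omega) ⟨ha1, ha2, hb1, hb2⟩ hst'
  rw [pvDedup_id _ [] PySem.Set.empty hinv.2 (by intro c _ h; simp [PySem.Set.empty] at h)]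
  simp
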